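-- pv_equiv track=rewrite | github.com/AnujF1005/SuperAgent | tools/file.py | _block_anchor_fallback_match
-- ===== SOURCE A (Python) =====
-- def _block_anchor_fallback_match(original_content: str, search_content: str, start_index: int) -> tuple[int, int] | None:
--     """
--     Attempts to match blocks of code by using the first and last lines as anchors.
--     This is a third-tier fallback strategy that helps match blocks where we can identify
--     the correct location by matching the beginning and end, even if the exact content
--     differs slightly.
--     """
--     original_lines = original_content.split("\n")
--     search_lines = search_content.split("\n")
--
--     # Only use this approach for blocks of 3+ lines
--     if len(search_lines) < 3:
--         return None
--
--     # Trim trailing empty line if exists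
--     if search_lines and search_lines[-1] == "":
--         search_lines.pop()
--
--     if not search_lines: # Handle empty search content after pop
--         return None
--
--     first_line_search = search_lines[0].strip()
--     last_line_search = search_lines[-1].strip()
--     search_block_size = len(search_lines)
--
--     # Find the line number where start_index falls
--     start_line_num = 0
--     current_char_index = 0
--     while current_char_index < start_index and start_line_num < len(original_lines):
--         current_char_index += len(original_lines[start_line_num]) + 1
--         start_line_num += 1
--
--     # Look for matching start and end anchors
--     for i in range(start_line_num, len(original_lines) - search_block_size + 1):
--         # Check if first line matches
--         if original_lines[i].strip() != first_line_search:
--             continue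
--
--         # Check if last line matches at the expected position
--         if original_lines[i + search_block_size - 1].strip() != last_line_search:
--             continue
--
--         # Calculate exact character positions
--         match_start_index = 0
--         for k in range(i):
--             match_start_index += len(original_lines[k]) + 1
--
--         match_end_index = match_start_index
--         for k in range(search_block_size):
--             match_end_index += len(original_lines[i + k]) + 1
--
--         # Adjust match_end_index if the last line of original_content doesn't end with a newline
--         if i + search_block_size == len(original_lines) and not original_content.endswith('\n'):
--             match_end_index -= 1
--
--         return [match_start_index, match_end_index]
--     return None
-- ===== SOURCE B (Python) =====
-- from bisect import bisect_left
-- from itertools import accumulate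
--
--
-- def _block_anchor_fallback_match(original_content: str, search_content: str, start_index: int):
--     search_lines = search_content.split("\n")
--     if len(search_lines) < 3:
--         return None
--     if search_lines[-1] == "":
--         search_lines.pop()
--     first = search_lines[0].strip()
--     last = search_lines[-1].strip()
--     block = len(search_lines)
--
--     lines = original_content.split("\n")
--     # cumulative character offsets: offsets[j] = index of the start of line j
--     offsets = [0] + list(accumulate(len(line) + 1 for line in lines))
--     start_line = min(bisect_left(offsets, start_index), len(lines))
--     stripped = [line.strip() for line in lines]
--
--     for i in range(start_line, len(lines) - block + 1):
--         if stripped[i] == first and stripped[i + block - 1] == last: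
--             end = offsets[i + block]
--             if i + block == len(lines) and not original_content.endswith("\n"):
--                 end -= 1
--             return [offsets[i], end]
--     return None
-- ===== Notes on version B (the rewrite author's own statement) =====
-- stated objective: idiomatic
-- what changed: Replaces the manual running-sum while-loop with bisect_left on a cumulative-offset table built once with itertools.accumulate, strips all lines once up front, and replaces both inner character-summation loops on a hit by O(1) offset-table lookups.
import Mathlib
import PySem

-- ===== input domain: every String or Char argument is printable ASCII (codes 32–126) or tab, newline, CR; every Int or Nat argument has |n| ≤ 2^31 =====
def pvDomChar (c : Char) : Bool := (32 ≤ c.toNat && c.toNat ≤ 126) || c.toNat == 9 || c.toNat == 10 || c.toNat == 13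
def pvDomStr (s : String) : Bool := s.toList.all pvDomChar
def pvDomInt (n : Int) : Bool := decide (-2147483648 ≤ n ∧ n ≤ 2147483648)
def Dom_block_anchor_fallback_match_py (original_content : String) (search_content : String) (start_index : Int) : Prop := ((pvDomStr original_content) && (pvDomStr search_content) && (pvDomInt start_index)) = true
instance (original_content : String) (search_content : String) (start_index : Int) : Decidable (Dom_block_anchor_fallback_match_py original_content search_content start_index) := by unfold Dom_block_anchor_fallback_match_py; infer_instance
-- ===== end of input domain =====

-- B replaces A's manual running-sum while-loop and per-hit inner summation loops by a
-- cumulative-offset table (bisect_left + O(1) lookups) with lines stripped once up front (idiomatic).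

-- ===== PORT A =====
-- helper: the while-loop locating the line number where start_index falls
def pvAStartLine : List (List Char) → Int → Int → Nat → Nat
  | [], _, _, n => n
  | l :: rest, si, cur, n =>
    if cur < si then pvAStartLine rest si (cur + ((l.length : Int) + 1)) (n + 1) else n

-- helper: the anchor-matching for-loop with its two inner summation loops
def pvAScan (lines : List (List Char)) (oc : List Char) (firstL lastL : List Char)
    (block : Int) : List Int → Option (List Int)
  | [] => none
  | i :: rest =>
    if PySem.Chars.strip (PySem.List.pyGetD lines i []) ≠ firstL then
      pvAScan lines oc firstL lastL block rest
    else if PySem.Chars.strip (PySem.List.pyGetD lines (i + block - 1) []) ≠ lastL then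
      pvAScan lines oc firstL lastL block rest
    else
      let ms := (PySem.List.pyRange 0 i 1).foldl
        (fun acc k => acc + (((PySem.List.pyGetD lines k []).length : Int) + 1)) 0
      let me := (PySem.List.pyRange 0 block 1).foldl
        (fun acc k => acc + (((PySem.List.pyGetD lines (i + k) []).length : Int) + 1)) ms
      let me' := if i + block = (lines.length : Int) ∧ PySem.Chars.endswith oc ['\n'] = false
        then me - 1 else me
      some [ms, me']

def block_anchor_fallback_match_py (original_content : String) (search_content : String) (start_index : Int) : Option (List Int) :=
  let original_lines := PySem.Chars.splitOn original_content.toList ['\n']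
  let search_lines := PySem.Chars.splitOn search_content.toList ['\n']
  if search_lines.length < 3 then none
  else
    let search_lines := if search_lines.getLast? = some [] then search_lines.dropLast else search_lines
    if search_lines.isEmpty then none
    else
      let firstL := PySem.Chars.strip (search_lines.headD [])
      let lastL := PySem.Chars.strip (search_lines.getLastD [])
      let block := (search_lines.length : Int)
      let startLine := pvAStartLine original_lines start_index 0 0
      pvAScan original_lines original_content.toList firstL lastL block
        (PySem.List.pyRange (startLine : Int) ((original_lines.length : Int) - block + 1) 1)

-- ===== PORT B =====
def block_anchor_fallback_match_py_alt (original_content : String) (search_content : String) (start_index : Int) : Option (List Int) :=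
  let search_lines := PySem.Chars.splitOn search_content.toList ['\n']
  if search_lines.length < 3 then none
  else
    let search_lines := if search_lines.getLast? = some [] then search_lines.dropLast else search_lines
    let firstL := PySem.Chars.strip (search_lines.headD [])
    let lastL := PySem.Chars.strip (search_lines.getLastD [])
    let block := (search_lines.length : Int)
    let lines := PySem.Chars.splitOn original_content.toList ['\n']
    -- offsets = [0] + accumulate(len(line) + 1): List.scanl
    let offsets := List.scanl (fun acc l => acc + ((l.length : Int) + 1)) 0 lines
    let startLine := min (PySem.List.bisectLeft offsets start_index) lines.length
    let stripped := lines.map PySem.Chars.strip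
    (PySem.List.pyRange (startLine : Int) ((lines.length : Int) - block + 1) 1).findSome?
      (fun i =>
        if PySem.List.pyGetD stripped i [] = firstL ∧
           PySem.List.pyGetD stripped (i + block - 1) [] = lastL then
          let e := PySem.List.pyGetD offsets (i + block) 0
          let e' := if i + block = (lines.length : Int) ∧
              PySem.Chars.endswith original_content.toList ['\n'] = false then e - 1 else e
          some [PySem.List.pyGetD offsets i 0, e']
        else none)

-- ===== PRECONDITION & SPEC =====
def Spec_block_anchor_fallback_match_py (original_content : String) (search_content : String) (start_index : Int) (out : Option (List Int)) : Prop := out = block_anchor_fallback_match_py_alt original_content search_content start_index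
instance (original_content : String) (search_content : String) (start_index : Int) (out : Option (List Int)) : Decidable (Spec_block_anchor_fallback_match_py original_content search_content start_index out) := by unfold Spec_block_anchor_fallback_match_py; infer_instance

-- ===== CLAIM (what is proved, stated in full; the proofs are below) =====
def Claim_equal_block_anchor_fallback_match_py : Prop := ∀ (original_content : String) (search_content : String) (start_index : Int), Dom_block_anchor_fallback_match_py original_content search_content start_index → Spec_block_anchor_fallback_match_py original_content search_content start_index (block_anchor_fallback_match_py original_content search_content start_index)

-- ===== LEMMAS AND PROOFS =====

-- weight of a line: len(line) + 1
def pvW (l : List Char) : Int := (l.length : Int) + 1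

-- sum of weights of lines[a], …, lines[a+n-1] (getD-total)
def pvPrefFrom (lines : List (List Char)) (a : Nat) : Nat → Int
  | 0 => 0
  | n + 1 => pvPrefFrom lines a n + pvW (lines.getD (a + n) [])

theorem pvPrefFrom_shift (x : List Char) (rest : List (List Char)) (a n : Nat) :
    pvPrefFrom (x :: rest) (a + 1) n = pvPrefFrom rest a n := by
  induction n with
  | zero => rfl
  | succ n ih =>
    show pvPrefFrom (x :: rest) (a + 1) n + pvW ((x :: rest).getD (a + 1 + n) [])
        = pvPrefFrom rest a n + pvW (rest.getD (a + n) [])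
    rw [ih]
    have h : a + 1 + n = (a + n) + 1 := by omega
    rw [h, List.getD_cons_succ]

theorem pvPrefFrom_split (lines : List (List Char)) (a m n : Nat) :
    pvPrefFrom lines a (m + n) = pvPrefFrom lines a m + pvPrefFrom lines (a + m) n := by
  induction n with
  | zero => simp [pvPrefFrom]
  | succ n ih =>
    have h1 : m + (n + 1) = (m + n) + 1 := by omega
    rw [h1]
    show pvPrefFrom lines a (m + n) + pvW (lines.getD (a + (m + n)) [])
        = pvPrefFrom lines a m + (pvPrefFrom lines (a + m) n + pvW (lines.getD (a + m + n) []))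
    rw [ih]
    have h2 : a + (m + n) = a + m + n := by omega
    rw [h2]; ring

theorem pvPrefFrom_cons (x : List Char) (rest : List (List Char)) (m : Nat) :
    pvPrefFrom (x :: rest) 0 (m + 1) = pvW x + pvPrefFrom rest 0 m := by
  have h := pvPrefFrom_split (x :: rest) 0 1 m
  have h1 : pvPrefFrom (x :: rest) 0 1 = pvW x := by simp [pvPrefFrom]
  have h2 : pvPrefFrom (x :: rest) (0 + 1) m = pvPrefFrom rest 0 m := pvPrefFrom_shift x rest 0 m
  have : 1 + m = m + 1 := by omega
  rw [← this, h, h1, h2]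

-- the scanl offsets table reads back prefix sums
theorem pvScanl_getD (lines : List (List Char)) (cur : Int) (n : Nat) (h : n ≤ lines.length) :
    (List.scanl (fun acc l => acc + ((l.length : Int) + 1)) cur lines).getD n 0
      = cur + pvPrefFrom lines 0 n := by
  induction lines generalizing cur n with
  | nil =>
    have hn : n = 0 := by simpa using h
    subst hn
    simp [List.scanl, pvPrefFrom]
  | cons l rest ih =>
    cases n with
    | zero => simp [List.scanl, pvPrefFrom]
    | succ m =>
      rw [List.scanl_cons, List.getD_cons_succ]
      rw [ih (cur + ((l.length : Int) + 1)) m (by simpa using h)]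
      rw [pvPrefFrom_cons]
      simp [pvW]; ring

-- every element of the scanl table is ≥ its seed
theorem pvScanl_le (lines : List (List Char)) (cur x : Int)
    (hx : x ∈ List.scanl (fun acc l => acc + ((l.length : Int) + 1)) cur lines) : cur ≤ x := by
  induction lines generalizing cur with
  | nil => simp [List.scanl] at hx; omega
  | cons l rest ih =>
    rw [List.scanl_cons] at hx
    rcases List.mem_cons.mp hx with h | h
    · omega
    · have := ih (cur + ((l.length : Int) + 1)) h
      have : (0:Int) ≤ (l.length : Int) := by positivity
      omega

-- the scanl table is sorted
theorem pvScanl_sorted (lines : List (List Char)) (cur : Int) :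
    (List.scanl (fun acc l => acc + ((l.length : Int) + 1)) cur lines).Pairwise (· ≤ ·) := by
  induction lines generalizing cur with
  | nil => simp [List.scanl]
  | cons l rest ih =>
    rw [List.scanl_cons]
    refine List.pairwise_cons.mpr ⟨?_, ih _⟩
    intro x hx
    have := pvScanl_le rest _ x hx
    have : (0:Int) ≤ (l.length : Int) := by positivity
    omega

-- bisect_left on a sorted cons
theorem pvBisect_cons (x : Int) (xs : List Int) (si : Int)
    (hs : (x :: xs).Pairwise (· ≤ ·)) :
    PySem.List.bisectLeft (x :: xs) si
      = if x < si then PySem.List.bisectLeft xs si + 1 else 0 := by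
  have hs' : xs.Pairwise (· ≤ ·) := (List.pairwise_cons.mp hs).2
  obtain ⟨hr1, hr2, hr3⟩ := PySem.List.bisectLeft_spec (x :: xs) si hs
  obtain ⟨ht1, ht2, ht3⟩ := PySem.List.bisectLeft_spec xs si hs'
  set r := PySem.List.bisectLeft (x :: xs) si with hrdef
  set t := PySem.List.bisectLeft xs si with htdef
  simp only [List.length_cons] at hr1 hr2 hr3
  by_cases hx : x < si
  · rw [if_pos hx]
    rcases Nat.lt_trichotomy r (t + 1) with h | h | h
    · exfalso
      rcases Nat.eq_zero_or_pos r with h0 | h0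
      · have := hr3 0 (by omega) (by omega)
        simp at this; omega
      · -- r ≥ 1, r - 1 < t
        have hlt : r - 1 < t := by omega
        have hb : r - 1 < xs.length := by omega
        have h1 := ht2 (r - 1) hb hlt
        have h2 := hr3 ((r - 1) + 1) (by omega) (by omega)
        rw [List.getElem_cons_succ] at h2
        omega
    · exact h.symm ▸ rfl
    · exfalso
      have hb : t < xs.length := by omega
      have h1 := hr2 (t + 1) (by omega) (by omega)
      have h2 := ht3 t hb (le_refl t)
      rw [List.getElem_cons_succ] at h1
      omega
  · rw [if_neg hx]
    by_contra hne
    have h1 := hr2 0 (by omega) (by omega)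
    simp at h1; omega

-- the while-loop equals min(bisect_left(offsets, si), len)
theorem pvStartLine_eq (lines : List (List Char)) (si cur : Int) (n : Nat) :
    pvAStartLine lines si cur n
      = n + min (PySem.List.bisectLeft
            (List.scanl (fun acc l => acc + ((l.length : Int) + 1)) cur lines) si)
          lines.length := by
  induction lines generalizing cur n with
  | nil => simp [pvAStartLine]
  | cons l rest ih =>
    rw [List.scanl_cons,
      pvBisect_cons cur _ si (by rw [← List.scanl_cons]; exact pvScanl_sorted (l :: rest) cur)]
    by_cases hc : cur < si
    · rw [if_pos hc]
      simp only [pvAStartLine, if_pos hc]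
      rw [ih (cur + ((l.length : Int) + 1)) (n + 1)]
      simp [Nat.succ_min_succ]
      omega
    · rw [if_neg hc]
      simp only [pvAStartLine, if_neg hc]
      simp

-- A's inner summation loop from index a over n lines, started at `init`
theorem pvFold_sum (lines : List (List Char)) (a m : Nat) (init : Int) :
    (List.range m).foldl
        (fun acc k => acc + (((lines.getD (a + k) []).length : Int) + 1)) init
      = init + pvPrefFrom lines a m := by
  induction m generalizing init with
  | zero => simp [pvPrefFrom]
  | succ m ih =>
    rw [List.range_succ, List.foldl_append, ih]
    simp only [List.foldl_cons, List.foldl_nil]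
    show init + pvPrefFrom lines a m + (((lines.getD (a + m) []).length : Int) + 1)
        = init + (pvPrefFrom lines a m + pvW (lines.getD (a + m) []))
    unfold pvW; ring

-- A's pyRange summation loop rewritten through pvPrefFrom
theorem pvMs_eq (lines : List (List Char)) (a : Nat) (init : Int) :
    (PySem.List.pyRange 0 (a : Int) 1).foldl
        (fun acc k => acc + (((PySem.List.pyGetD lines k []).length : Int) + 1)) init
      = init + pvPrefFrom lines 0 a := by
  rw [PySem.List.pyRange_one]
  have h0 : ((a : Int) - 0).toNat = a := by omega
  rw [h0, List.foldl_map]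
  have hf : (fun (acc : Int) (k : Nat) =>
        acc + (((PySem.List.pyGetD lines ((0 : Int) + (k : Nat)) []).length : Int) + 1))
      = (fun (acc : Int) (k : Nat) => acc + (((lines.getD (0 + k) []).length : Int) + 1)) := by
    funext acc k
    rw [show (0 : Int) + (k : Nat) = ((k : Nat) : Int) by ring, PySem.List.pyGetD_natCast]
    norm_num
  rw [hf]
  exact pvFold_sum lines 0 a init

theorem pvMe_eq (lines : List (List Char)) (a b : Nat) (init : Int) :
    (PySem.List.pyRange 0 (b : Int) 1).foldl
        (fun acc k => acc + (((PySem.List.pyGetD lines ((a : Int) + k) []).length : Int) + 1)) init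
      = init + pvPrefFrom lines a b := by
  rw [PySem.List.pyRange_one]
  have h0 : ((b : Int) - 0).toNat = b := by omega
  rw [h0, List.foldl_map]
  have hf : (fun (acc : Int) (k : Nat) =>
        acc + (((PySem.List.pyGetD lines ((a : Int) + ((0 : Int) + (k : Nat))) []).length : Int) + 1))
      = (fun (acc : Int) (k : Nat) => acc + (((lines.getD (a + k) []).length : Int) + 1)) := by
    funext acc k
    rw [show (a : Int) + ((0 : Int) + (k : Nat)) = ((a + k : Nat) : Int) by push_cast; ring,
      PySem.List.pyGetD_natCast]
  rw [hf]
  exact pvFold_sum lines a b init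

-- the anchor scan: A's recursive early-return loop equals B's findSome? over the same index list
theorem pvScan_eq (lines : List (List Char)) (oc : List Char) (firstL lastL : List Char)
    (block : Int) (hb : 1 ≤ block) (idxs : List Int)
    (hmem : ∀ i ∈ idxs, 0 ≤ i ∧ i + block ≤ (lines.length : Int)) :
    pvAScan lines oc firstL lastL block idxs
      = idxs.findSome? (fun i =>
          if PySem.List.pyGetD (lines.map PySem.Chars.strip) i [] = firstL ∧
             PySem.List.pyGetD (lines.map PySem.Chars.strip) (i + block - 1) [] = lastL then
            let e := PySem.List.pyGetD
              (List.scanl (fun acc l => acc + ((l.length : Int) + 1)) 0 lines) (i + block) 0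
            let e' := if i + block = (lines.length : Int) ∧
                PySem.Chars.endswith oc ['\n'] = false then e - 1 else e
            some [PySem.List.pyGetD
              (List.scanl (fun acc l => acc + ((l.length : Int) + 1)) 0 lines) i 0, e']
          else none) := by
  induction idxs with
  | nil => rfl
  | cons i rest ih =>
    obtain ⟨hi0, hib⟩ := hmem i (List.mem_cons_self ..)
    have hrest : ∀ j ∈ rest, 0 ≤ j ∧ j + block ≤ (lines.length : Int) := by
      intro j hj; exact hmem j (List.mem_cons_of_mem _ hj)
    obtain ⟨a, rfl⟩ : ∃ a : Nat, (a : Int) = i := ⟨i.toNat, Int.toNat_of_nonneg hi0⟩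
    have hbn : block = ((block.toNat : Nat) : Int) := (Int.toNat_of_nonneg (by omega)).symm
    set bn := block.toNat with hbndef
    have haL : a + bn ≤ lines.length := by omega
    have haL' : a < lines.length := by omega
    have hstrip_a : PySem.Chars.strip (PySem.List.pyGetD lines (a : Int) [])
        = PySem.List.pyGetD (lines.map PySem.Chars.strip) (a : Int) [] := by
      rw [PySem.List.pyGetD_natCast, PySem.List.pyGetD_natCast]
      rw [List.getD_eq_getElem _ _ haL', List.getD_eq_getElem _ _ (by simpa using haL')]
      simp
    have hidx2 : (a : Int) + block - 1 = (((a + bn - 1 : Nat)) : Int) := by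
      omega
    have hstrip_b : PySem.Chars.strip (PySem.List.pyGetD lines ((a : Int) + block - 1) [])
        = PySem.List.pyGetD (lines.map PySem.Chars.strip) ((a : Int) + block - 1) [] := by
      rw [hidx2, PySem.List.pyGetD_natCast, PySem.List.pyGetD_natCast]
      have hlt : a + bn - 1 < lines.length := by omega
      rw [List.getD_eq_getElem _ _ hlt, List.getD_eq_getElem _ _ (by simpa using hlt)]
      simp
    rw [List.findSome?_cons]
    by_cases h1 : PySem.List.pyGetD (lines.map PySem.Chars.strip) (a : Int) [] = firstL
    · by_cases h2 : PySem.List.pyGetD (lines.map PySem.Chars.strip) ((a : Int) + block - 1) [] = lastL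
      · -- hit
        rw [if_pos ⟨h1, h2⟩]
        simp only [pvAScan]
        rw [if_neg (by rw [hstrip_a]; exact not_not_intro h1),
          if_neg (by rw [hstrip_b]; exact not_not_intro h2)]
        have hms : (PySem.List.pyRange 0 (a : Int) 1).foldl
            (fun acc k => acc + (((PySem.List.pyGetD lines k []).length : Int) + 1)) 0
            = pvPrefFrom lines 0 a := by rw [pvMs_eq]; ring
        have hBi : PySem.List.pyGetD
            (List.scanl (fun acc l => acc + ((l.length : Int) + 1)) 0 lines) (a : Int) 0
            = pvPrefFrom lines 0 a := by
          rw [PySem.List.pyGetD_natCast,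
            pvScanl_getD lines 0 a (by omega)]
          ring
        have hBe : PySem.List.pyGetD
            (List.scanl (fun acc l => acc + ((l.length : Int) + 1)) 0 lines) ((a : Int) + block) 0
            = pvPrefFrom lines 0 (a + bn) := by
          have : (a : Int) + block = ((a + bn : Nat) : Int) := by push_cast; omega
          rw [this, PySem.List.pyGetD_natCast,
            pvScanl_getD lines 0 (a + bn) haL]
          ring
        have hme : (PySem.List.pyRange 0 block 1).foldl
            (fun acc k => acc + (((PySem.List.pyGetD lines ((a : Int) + k) []).length : Int) + 1))
            (pvPrefFrom lines 0 a)
            = pvPrefFrom lines 0 (a + bn) := by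
          rw [hbn, pvMe_eq lines a bn]
          rw [pvPrefFrom_split lines 0 a bn]
          simp
        simp only [hms, hme, hBi, hBe]
      · rw [if_neg (by intro h; exact h2 h.2)]
        simp only [pvAScan]
        rw [if_neg (by rw [hstrip_a]; exact not_not_intro h1)]
        rw [if_pos (by rw [hstrip_b]; exact h2)]
        exact ih hrest
    · rw [if_neg (by intro h; exact h1 h.1)]
      simp only [pvAScan]
      rw [if_pos (by rw [hstrip_a]; exact h1)]
      exact ih hrest

-- ===== VERDICT (by name: the statement is the Claim_ definition above) =====
theorem block_anchor_fallback_match_py_spec : Claim_equal_block_anchor_fallback_match_py := by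
  intro oc sc si _
  unfold Spec_block_anchor_fallback_match_py
  unfold block_anchor_fallback_match_py block_anchor_fallback_match_py_alt
  set sl := PySem.Chars.splitOn sc.toList ['\n'] with hsl
  by_cases h3 : sl.length < 3
  · simp [h3]
  · rw [if_neg h3, if_neg h3]
    set sl' := if sl.getLast? = some [] then sl.dropLast else sl with hsl'
    have hlen : 2 ≤ sl'.length := by
      rw [hsl']
      split
      · rw [List.length_dropLast]; omega
      · omega
    have hne : ¬ sl'.isEmpty := by
      rw [List.isEmpty_iff]; intro h; rw [h] at hlen; simp at hlen
    rw [if_neg hne]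
    set lines := PySem.Chars.splitOn oc.toList ['\n'] with hlines
    set block := (sl'.length : Int) with hblock
    rw [pvStartLine_eq lines si 0 0]
    rw [pvScan_eq lines oc.toList _ _ block (by omega) _ (by
      intro i hi
      rw [PySem.List.mem_pyRange_one] at hi
      obtain ⟨hi1, hi2⟩ := hi
      constructor
      · have h0 : (0 : Int) ≤ ((0 + min (PySem.List.bisectLeft
            (List.scanl (fun acc l => acc + ((l.length : Int) + 1)) 0 lines) si)
            lines.length : Nat) : Int) := by positivity
        omega
      · omega)]
    simp only [Nat.zero_add]
    rw [hblock]
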